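-- pv_equiv track=rewrite | github.com/BenjaminXiang/MiroThinker | apps/miroflow-agent/scripts/run_professor_phase_a_audit.py | _select_fixed_entries
-- ===== SOURCE A (Python) =====
-- from collections import Counter
-- from typing import Any, TypedDict
--
-- class SeedEntry(TypedDict):
--     index: int
--     label: str
--     url: str
--     institution: str
--
-- def _select_fixed_entries(entries: list[SeedEntry], fixed_per_school: int) -> list[SeedEntry]:
--     if fixed_per_school <= 0:
--         return []
--     selected: list[SeedEntry] = []
--     counts: Counter[str] = Counter()
--     for entry in entries:
--         if counts[entry["institution"]] >= fixed_per_school: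
--             continue
--         selected.append(entry)
--         counts[entry["institution"]] += 1
--     return selected
-- ===== SOURCE B (Python) =====
-- def _select_fixed_entries(entries, fixed_per_school):
--     if fixed_per_school <= 0:
--         return []
--     return [
--         entry
--         for i, entry in enumerate(entries)
--         if sum(1 for prev in entries[:i]
--                if prev["institution"] == entry["institution"]) < fixed_per_school
--     ]
-- ===== Notes on version B (the rewrite author's own statement) =====
-- stated objective: simpler
-- what changed: Replaces the stateful single pass with a running Counter by a stateless comprehension that keeps an entry iff fewer than fixed_per_school earlier entries share its institution (prefix rescan instead of maintained counts).
import Mathlib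
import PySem

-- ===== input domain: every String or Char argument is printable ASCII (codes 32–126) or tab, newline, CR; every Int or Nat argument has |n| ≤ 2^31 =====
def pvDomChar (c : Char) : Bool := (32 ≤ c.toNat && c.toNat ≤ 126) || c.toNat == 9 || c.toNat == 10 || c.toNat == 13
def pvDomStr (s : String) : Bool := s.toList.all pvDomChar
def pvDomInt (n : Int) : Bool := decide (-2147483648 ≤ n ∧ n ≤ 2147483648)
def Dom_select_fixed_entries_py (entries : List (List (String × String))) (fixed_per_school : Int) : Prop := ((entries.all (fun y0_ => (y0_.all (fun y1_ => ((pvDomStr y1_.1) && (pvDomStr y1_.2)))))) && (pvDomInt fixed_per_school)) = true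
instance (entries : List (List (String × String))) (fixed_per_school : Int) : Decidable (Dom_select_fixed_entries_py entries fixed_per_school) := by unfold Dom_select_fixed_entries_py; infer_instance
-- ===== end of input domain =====

-- B replaces A's running-Counter single pass by a stateless comprehension (keep entry iff
-- fewer than fixed_per_school earlier entries share its institution); objective: simpler.

-- entry["institution"]: first-match lookup; the .getD "" default is only reached outside
-- Pre_ (Python raises KeyError there)
def pvInst (e : List (String × String)) : String :=
  ((PySem.Dict.mk e).get? "institution").getD ""

-- ===== PORT A =====
-- A's loop body: check the counter, append and bump the count (Counter[x] += 1)
def pvStepA (k : Int) (st : List (List (String × String)) × PySem.Dict String Int)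
    (e : List (String × String)) : List (List (String × String)) × PySem.Dict String Int :=
  if k ≤ st.2.getD (pvInst e) 0 then st
  else (st.1 ++ [e], st.2.insert (pvInst e) (st.2.getD (pvInst e) 0 + 1))

def select_fixed_entries_py (entries : List (List (String × String))) (fixed_per_school : Int) : List (List (String × String)) :=
  if fixed_per_school ≤ 0 then []
  else (entries.foldl (pvStepA fixed_per_school) ([], PySem.Dict.empty)).1

-- ===== PORT B =====
def select_fixed_entries_py_alt (entries : List (List (String × String))) (fixed_per_school : Int) : List (List (String × String)) :=
  if fixed_per_school ≤ 0 then []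
  else ((PySem.List.enumerate entries 0).filter (fun p =>
          ((PySem.List.slice entries none (some p.1)).countP
              (fun prev => pvInst prev == pvInst p.2) : Int) < fixed_per_school)).map (·.2)

-- ===== PRECONDITION & SPEC =====
-- Pre_ excludes exactly the inputs where entry["institution"] raises KeyError in A (and in B):
-- a missing "institution" key is only reached when fixed_per_school > 0.
def Pre_select_fixed_entries_py (entries : List (List (String × String))) (fixed_per_school : Int) : Prop :=
  fixed_per_school ≤ 0 ∨ ∀ e ∈ entries, (PySem.Dict.mk e).contains "institution" = true

instance (entries : List (List (String × String))) (fixed_per_school : Int) : Decidable (Pre_select_fixed_entries_py entries fixed_per_school) := by unfold Pre_select_fixed_entries_py; infer_instance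

def pvWitness_select_fixed_entries_py : (List (List (String × String))) × Int :=
  ([[("institution", "mit"), ("label", "a")], [("institution", "mit")], [("institution", "cmu")]], 1)

def Spec_select_fixed_entries_py (entries : List (List (String × String))) (fixed_per_school : Int) (out : List (List (String × String))) : Prop := out = select_fixed_entries_py_alt entries fixed_per_school
instance (entries : List (List (String × String))) (fixed_per_school : Int) (out : List (List (String × String))) : Decidable (Spec_select_fixed_entries_py entries fixed_per_school out) := by unfold Spec_select_fixed_entries_py; infer_instance

-- ===== CLAIM (what is proved, stated in full; the proofs are below) =====
def Claim_equal_select_fixed_entries_py : Prop := ∀ (entries : List (List (String × String))) (fixed_per_school : Int), Dom_select_fixed_entries_py entries fixed_per_school → Pre_select_fixed_entries_py entries fixed_per_school → Spec_select_fixed_entries_py entries fixed_per_school (select_fixed_entries_py entries fixed_per_school)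

-- ===== LEMMAS AND PROOFS =====

-- invariant relating A's fold (from a state summarising the prefix `pre`) to B's filter
lemma pvLoop (k : Int) (suf : List (List (String × String))) :
    ∀ (pre sel : List (List (String × String))) (counts : PySem.Dict String Int),
    (∀ s : String, counts.getD s 0 = min ((pre.countP (fun e => pvInst e == s)) : Int) k) →
    (suf.foldl (pvStepA k) (sel, counts)).1
      = sel ++ ((PySem.List.enumerate suf (pre.length : Int)).filter (fun p =>
          ((PySem.List.slice (pre ++ suf) none (some p.1)).countP
              (fun prev => pvInst prev == pvInst p.2) : Int) < k)).map (·.2) := by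
  induction suf with
  | nil => intro pre sel counts _; simp [PySem.List.enumerate]
  | cons e rest ih =>
    intro pre sel counts hc
    have hslice : PySem.List.slice (pre ++ e :: rest) none (some (pre.length : Int)) = pre := by
      rw [PySem.List.slice_to_natCast]
      exact List.take_left ..
    have hcnt := hc (pvInst e)
    rw [PySem.List.enumerate_cons, List.filter_cons]
    by_cases hsel : ((pre.countP (fun q => pvInst q == pvInst e)) : Int) < k
    · -- selected
      have hbranch : ¬ k ≤ counts.getD (pvInst e) 0 := by rw [hcnt]; omega
      have hinv : ∀ s : String,
          (counts.insert (pvInst e) (counts.getD (pvInst e) 0 + 1)).getD s 0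
            = min (((pre ++ [e]).countP (fun q => pvInst q == s)) : Int) k := by
        intro s
        rw [PySem.Dict.getD_insert]
        by_cases hs : s = pvInst e
        · subst hs
          simp only [hcnt, List.countP_append]
          simp only [List.countP_cons, List.countP_nil, beq_self_eq_true, if_pos]
          push_cast
          omega
        · have : pvInst e ≠ s := fun h => hs h.symm
          simp only [if_neg hs, hc s, List.countP_append, List.countP_cons, List.countP_nil,
            beq_iff_eq, this, if_false]
          norm_num
      have step : pvStepA k (sel, counts) e
          = (sel ++ [e], counts.insert (pvInst e) (counts.getD (pvInst e) 0 + 1)) := by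
        simp [pvStepA, hbranch]
      rw [List.foldl_cons, step, ih (pre ++ [e]) (sel ++ [e]) _ hinv,
        if_pos (by simpa [hslice] using hsel)]
      simp
    · -- skipped
      have hbranch : k ≤ counts.getD (pvInst e) 0 := by rw [hcnt]; omega
      have hinv : ∀ s : String,
          counts.getD s 0 = min (((pre ++ [e]).countP (fun q => pvInst q == s)) : Int) k := by
        intro s
        by_cases hs : s = pvInst e
        · subst hs
          rw [hcnt]
          simp only [List.countP_append, List.countP_cons, List.countP_nil, beq_self_eq_true,
            if_pos]
          push_cast
          omega
        · have : pvInst e ≠ s := fun h => hs h.symm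
          rw [hc s]
          simp only [List.countP_append, List.countP_cons, List.countP_nil, beq_iff_eq, this,
            if_false]
          norm_num
      have step : pvStepA k (sel, counts) e = (sel, counts) := by
        simp [pvStepA, hbranch]
      rw [List.foldl_cons, step, ih (pre ++ [e]) sel _ hinv,
        if_neg (by simpa [hslice] using hsel)]
      simp

-- ===== VERDICT (by name: the statement is the Claim_ definition above) =====
theorem select_fixed_entries_py_spec : Claim_equal_select_fixed_entries_py := by
  intro entries k _ _
  unfold Spec_select_fixed_entries_py select_fixed_entries_py select_fixed_entries_py_alt
  by_cases hk : k ≤ 0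
  · simp [hk]
  · rw [if_neg hk, if_neg hk]
    have h := pvLoop k entries [] [] PySem.Dict.empty (by
      intro s
      simp [PySem.Dict.getD_empty]
      omega)
    simpa using h
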